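-- pv_equiv track=rewrite | github.com/rakseli/finnish-modernberts | src/data-tools/get_tokens_stats.py | get_values_at_target_steps
-- ===== SOURCE A (Python) =====
-- import bisect
--
-- def get_values_at_target_steps(data, target_steps):
--     """
--     Extract values at specific target steps or their nearest available steps.
--
--     Args:
--         data: Dictionary with run names and (step, value) lists
--         target_steps: List of specific steps to extract values from
--
--     Returns:
--         Dictionary with run names and values at target steps
--     """
--     results = {}
--
--     for run, step_values in data.items():
--         # Sort by step
--         step_values.sort(key=lambda x: x[0])
--
--         # Extract steps and values into separate lists for easier processing
--         steps = [sv[0] for sv in step_values]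
--         values = [sv[1] for sv in step_values]
--
--         run_results = []
--         for target in target_steps:
--             # Find the index of the closest step
--             if target <= steps[0]:
--                 # Target is before or at the first step
--                 closest_idx = 0
--             elif target >= steps[-1]:
--                 # Target is at or after the last step
--                 closest_idx = len(steps) - 1
--             else:
--                 # Find the insertion point
--                 idx = bisect.bisect_left(steps, target)
--                 # Determine if the previous or next step is closer
--                 if idx == len(steps):
--                     closest_idx = idx - 1
--                 elif idx == 0:
--                     closest_idx = idx
--                 else:
--                     prev_diff = target - steps[idx-1]
--                     next_diff = steps[idx] - target
--                     closest_idx = idx if next_diff < prev_diff else idx-1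
--
--             actual_step = steps[closest_idx]
--             value = values[closest_idx]
--             run_results.append((target, actual_step, value))
--
--         results[run] = run_results
--
--     return results
-- ===== SOURCE B (Python) =====
-- def get_values_at_target_steps(data, target_steps):
--     """Nearest-step lookup per run: sort each run in place, then for each target
--     take the last pair below it and the first pair at-or-above it in one scan,
--     and keep whichever is closer (the lower one on a tie)."""
--     results = {}
--     for run, step_values in data.items():
--         step_values.sort(key=lambda x: x[0])
--         run_results = []
--         for target in target_steps:
--             below = None
--             above = None
--             for sv in step_values:
--                 if sv[0] < target:
--                     below = sv
--                 else:
--                     above = sv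
--                     break
--             if below is None:
--                 closest = above
--             elif above is None:
--                 closest = below
--             else:
--                 closest = above if above[0] - target < target - below[0] else below
--             run_results.append((target, closest[0], closest[1]))
--         results[run] = run_results
--     return results
-- ===== Notes on version B (the rewrite author's own statement) =====
-- stated objective: simpler
-- what changed: Replaces the bisect call plus four boundary/tie-break index branches by a single linear scan that keeps the last pair below the target and the first pair at-or-above it, then returns whichever is closer (the lower one on a tie).
-- outside the precondition, e.g. on get_values_at_target_steps({'': [(0, 0), (1, 1), (1, 2)]}, [1]): A returns {'': [(1, 1, 2)]}, B returns {'': [(1, 1, 1)]}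
import Mathlib
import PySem

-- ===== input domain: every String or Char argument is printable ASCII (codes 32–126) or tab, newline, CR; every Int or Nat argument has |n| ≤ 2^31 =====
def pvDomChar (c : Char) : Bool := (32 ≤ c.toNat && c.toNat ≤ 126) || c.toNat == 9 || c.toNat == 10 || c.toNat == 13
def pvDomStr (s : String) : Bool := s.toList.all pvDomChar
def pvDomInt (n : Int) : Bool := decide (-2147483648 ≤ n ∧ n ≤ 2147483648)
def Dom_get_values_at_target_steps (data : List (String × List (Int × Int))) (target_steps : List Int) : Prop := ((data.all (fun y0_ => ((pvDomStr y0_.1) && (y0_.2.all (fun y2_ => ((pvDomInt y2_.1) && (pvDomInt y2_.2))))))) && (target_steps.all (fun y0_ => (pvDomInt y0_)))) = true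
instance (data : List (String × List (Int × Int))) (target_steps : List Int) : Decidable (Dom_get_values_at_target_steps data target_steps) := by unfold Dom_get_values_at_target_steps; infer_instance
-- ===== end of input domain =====

-- B replaces A's bisect + boundary/tie-break index arithmetic by one linear scan keeping the
-- last pair below and the first pair at-or-above each target (simpler); both sort each run's
-- list in place (mutation preserved by B); the equivalence proved is about the return value.


-- ===== PORT A =====
-- bisect.bisect_left on a sorted list of Ints: number of elements < x (exact on sorted input;
-- A sorts `steps` before calling it).
def pyBisectLeft (l : List Int) (x : Int) : Int :=
  (l.countP (fun s => decide (s < x)) : Int)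

-- the body of A's inner `for target` loop: choose the index of the closest step
def closestIdxA (steps : List Int) (target : Int) : Int :=
  if target ≤ PySem.List.pyGetD steps 0 0 then 0
  else if PySem.List.pyGetD steps (-1) 0 ≤ target then (steps.length : Int) - 1
  else
    let idx : Int := pyBisectLeft steps target
    if idx = (steps.length : Int) then idx - 1
    else if idx = 0 then idx
    else
      let prev_diff := target - PySem.List.pyGetD steps (idx - 1) 0
      let next_diff := PySem.List.pyGetD steps idx 0 - target
      if next_diff < prev_diff then idx else idx - 1

-- the body of A's outer `for run` loop
def rowA (step_values : List (Int × Int)) (target_steps : List Int) : List (Int × Int × Int) :=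
  let sv := PySem.List.sorted step_values (fun x => x.1) false
  let steps := sv.map (fun p => p.1)
  let values := sv.map (fun p => p.2)
  target_steps.map (fun target =>
    let ci := closestIdxA steps target
    (target, PySem.List.pyGetD steps ci 0, PySem.List.pyGetD values ci 0))

def get_values_at_target_steps (data : List (String × List (Int × Int))) (target_steps : List Int) : List (String × List (Int × Int × Int)) :=
  (data.foldl (fun results p => results.insert p.1 (rowA p.2 target_steps))
    (PySem.Dict.empty : PySem.Dict String (List (Int × Int × Int)))).items

-- ===== PORT B =====
-- B's inner `for sv ... break` loop: the last pair with step < target (below) and the first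
-- pair with step ≥ target (above), in one left-to-right pass
def scanBA (t : Int) : List (Int × Int) → Option (Int × Int) × Option (Int × Int)
  | [] => (none, none)
  | sv :: rest =>
    if sv.1 < t then
      let ba := scanBA t rest
      (some (ba.1.getD sv), ba.2)
    else (none, some sv)

-- the body of B's `for target` loop
def rowB (step_values : List (Int × Int)) (target_steps : List Int) : List (Int × Int × Int) :=
  let sv := PySem.List.sorted step_values (fun x => x.1) false
  target_steps.map (fun target =>
    let closest : Int × Int :=
      match scanBA target sv with
      | (none, above) => above.getD (0, 0)   -- `closest` is None in Python only on an empty run: outside Pre_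
      | (some below, none) => below
      | (some below, some above) =>
        if above.1 - target < target - below.1 then above else below
    (target, closest.1, closest.2))

def get_values_at_target_steps_alt (data : List (String × List (Int × Int))) (target_steps : List Int) : List (String × List (Int × Int × Int)) :=
  (data.foldl (fun results p => results.insert p.1 (rowB p.2 target_steps))
    (PySem.Dict.empty : PySem.Dict String (List (Int × Int × Int)))).items

-- ===== PRECONDITION & SPEC =====
-- Pre_ excludes (when target_steps is nonempty) runs with an empty pair list — A raises
-- IndexError and B raises TypeError there — and targets equal to a run's duplicated maximum
-- step when a smaller step also exists: which duplicate's value A returns there is an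
-- accident of its bisect index arithmetic (first-vs-last match on a tie).
def Pre_get_values_at_target_steps (data : List (String × List (Int × Int))) (target_steps : List Int) : Prop :=
  ∀ p ∈ data, (target_steps ≠ [] → p.2 ≠ []) ∧
    ∀ t ∈ target_steps,
      ¬((p.2.map Prod.fst).max? = some t ∧ 2 ≤ (p.2.map Prod.fst).count t ∧
        ∃ s ∈ p.2.map Prod.fst, s < t)
instance (data : List (String × List (Int × Int))) (target_steps : List Int) : Decidable (Pre_get_values_at_target_steps data target_steps) := by unfold Pre_get_values_at_target_steps; infer_instance

def pvWitness_get_values_at_target_steps : (List (String × List (Int × Int))) × List Int :=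
  ([("run a", [(10, 3), (0, 1), (20, 7), (10, 5)]), ("run b", [(5, -2)])], [0, 4, 15, 100])

def Spec_get_values_at_target_steps (data : List (String × List (Int × Int))) (target_steps : List Int) (out : List (String × List (Int × Int × Int))) : Prop := out = get_values_at_target_steps_alt data target_steps
instance (data : List (String × List (Int × Int))) (target_steps : List Int) (out : List (String × List (Int × Int × Int))) : Decidable (Spec_get_values_at_target_steps data target_steps out) := by unfold Spec_get_values_at_target_steps; infer_instance

-- ===== CLAIM (what is proved, stated in full; the proofs are below) =====
def Claim_equal_get_values_at_target_steps : Prop := ∀ (data : List (String × List (Int × Int))) (target_steps : List Int), Dom_get_values_at_target_steps data target_steps → Pre_get_values_at_target_steps data target_steps → Spec_get_values_at_target_steps data target_steps (get_values_at_target_steps data target_steps)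

-- ===== LEMMAS AND PROOFS =====

-- countP (< t) on a (weakly) sorted list marks exactly the prefix below t
lemma sorted_countP_lt (l : List Int) (t : Int) (hs : l.Pairwise (· ≤ ·)) :
    ∀ i, (hi : i < l.length) → (l[i] < t ↔ i < l.countP (fun s => decide (s < t))) := by
  induction l with
  | nil => intro i hi; simp at hi
  | cons x xs ih =>
    have hx : ∀ y ∈ xs, x ≤ y := fun y hy => List.rel_of_pairwise_cons hs hy
    have hs' : xs.Pairwise (· ≤ ·) := hs.of_cons
    intro i hi
    rw [List.countP_cons]
    by_cases hxt : x < t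
    · simp only [hxt, decide_true, if_true]
      cases i with
      | zero => simp [hxt]
      | succ k =>
        have hk : k < xs.length := by simpa using hi
        have := ih hs' k hk
        simp only [List.getElem_cons_succ]
        omega
    · have hc0 : xs.countP (fun s => decide (s < t)) = 0 := by
        rw [List.countP_eq_zero]
        intro y hy
        have := hx y hy
        simp only [decide_eq_true_eq]
        omega
      have hxb : (decide (x < t)) = false := decide_eq_false hxt
      simp only [hxb, Bool.false_eq_true, if_false, hc0, Nat.add_zero]
      cases i with
      | zero =>
        simp only [List.getElem_cons_zero]
        constructor
        · intro h; exact absurd h hxt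
        · intro h; omega
      | succ k =>
        have hk : k < xs.length := by simpa using hi
        have := hx xs[k] (List.getElem_mem hk)
        simp only [List.getElem_cons_succ]
        constructor
        · intro h; omega
        · intro h; omega

-- on a (weakly) step-sorted list the scan returns the pair just below and the pair just
-- at-or-above the target, i.e. the pairs at positions c-1 and c for c = #{steps < t}
lemma scanBA_eq (t : Int) (l : List (Int × Int)) (hs : l.Pairwise (fun a b => a.1 ≤ b.1)) :
    scanBA t l =
      ((if 0 < l.countP (fun p => decide (p.1 < t)) then
          l[l.countP (fun p => decide (p.1 < t)) - 1]? else none),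
       l[l.countP (fun p => decide (p.1 < t))]?) := by
  induction l with
  | nil => simp [scanBA]
  | cons x rest ih =>
    have hx : ∀ y ∈ rest, x.1 ≤ y.1 := fun y hy => List.rel_of_pairwise_cons hs hy
    have hs' : rest.Pairwise (fun a b => a.1 ≤ b.1) := hs.of_cons
    have hle : rest.countP (fun p => decide (p.1 < t)) ≤ rest.length :=
      List.countP_le_length
    by_cases hxt : x.1 < t
    · have hcc : (x :: rest).countP (fun p => decide (p.1 < t))
          = rest.countP (fun p => decide (p.1 < t)) + 1 := by
        simp [hxt]
      simp only [scanBA, if_pos hxt, ih hs', hcc]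
      rw [if_pos (Nat.succ_pos _), Nat.add_sub_cancel, List.getElem?_cons_succ]
      simp only [Prod.mk.injEq, and_true]
      by_cases hr0 : 0 < rest.countP (fun p => decide (p.1 < t))
      · rw [if_pos hr0]
        rw [List.getElem?_eq_getElem (by omega),
            List.getElem?_eq_getElem (l := x :: rest) (by simp; omega)]
        simp only [Option.getD_some, Option.some.injEq]
        rw [List.getElem_cons]
        rw [dif_neg (by omega)]
      · have hr0' : rest.countP (fun p => decide (p.1 < t)) = 0 := by omega
        rw [if_neg hr0]
        simp [hr0']
    · have hc0 : rest.countP (fun p => decide (p.1 < t)) = 0 := by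
        rw [List.countP_eq_zero]
        intro y hy
        have := hx y hy
        simp only [decide_eq_true_eq]
        omega
      have hcc : (x :: rest).countP (fun p => decide (p.1 < t)) = 0 := by
        simp [hxt, hc0]
      simp only [scanBA, if_neg hxt, hcc]
      simp

-- the heart: on a nonempty, step-sorted run with no duplicated-max tie at t, the two
-- selections agree
lemma row_core (l : List (Int × Int)) (hne : l ≠ [])
    (hs : l.Pairwise (fun a b => a.1 ≤ b.1)) (t : Int)
    (hcorner : ¬((l.map Prod.fst).max? = some t ∧ 2 ≤ (l.map Prod.fst).count t ∧
        ∃ s ∈ l.map Prod.fst, s < t)) :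
    ((t, PySem.List.pyGetD (l.map (fun p => p.1)) (closestIdxA (l.map (fun p => p.1)) t) 0,
          PySem.List.pyGetD (l.map (fun p => p.2)) (closestIdxA (l.map (fun p => p.1)) t) 0) : Int × Int × Int) =
    (let closest : Int × Int :=
      match scanBA t l with
      | (none, above) => above.getD (0, 0)
      | (some below, none) => below
      | (some below, some above) =>
        if above.1 - t < t - below.1 then above else below
     (t, closest.1, closest.2)) := by
  have hn : 0 < l.length := List.length_pos_iff.mpr hne
  set steps := l.map (fun p : Int × Int => p.1) with hsteps
  set values := l.map (fun p : Int × Int => p.2) with hvalues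
  set c := l.countP (fun p => decide (p.1 < t)) with hcdef
  have hlen : steps.length = l.length := by simp [hsteps]
  have hcle : c ≤ l.length := List.countP_le_length
  have hmono : ∀ i k, (hik : i ≤ k) → (hk : k < l.length) → (l[i]'(by omega)).1 ≤ l[k].1 := by
    intro i k hik hk
    rcases Nat.eq_or_lt_of_le hik with rfl | hlt
    · exact le_refl _
    · exact List.pairwise_iff_getElem.mp hs i k (by omega) hk hlt
  have hget : ∀ (j : Nat) (hj : j < l.length), PySem.List.pyGetD steps (j : Int) 0 = (l[j]'hj).1 := by
    intro j hj
    rw [PySem.List.pyGetD_eq_getElem steps 0 (Int.natCast_nonneg j) (by rw [hlen]; exact_mod_cast hj)]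
    simp [hsteps]
  have hgetv : ∀ (j : Nat) (hj : j < l.length), PySem.List.pyGetD values (j : Int) 0 = (l[j]'hj).2 := by
    intro j hj
    rw [PySem.List.pyGetD_eq_getElem values 0 (Int.natCast_nonneg j) (by simp [hvalues]; exact_mod_cast hj)]
    simp [hvalues]
  have h0 : PySem.List.pyGetD steps 0 0 = (l[0]'hn).1 := by simpa using hget 0 hn
  have hlast : PySem.List.pyGetD steps (-1) 0 = (l[l.length - 1]'(by omega)).1 := by
    rw [PySem.List.pyGetD_neg_one steps 0 (by simp [hsteps, hne])]
    rw [List.getLast_eq_getElem]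
    simp [hsteps]
  have hcsteps : steps.countP (fun s => decide (s < t)) = c := by
    rw [hsteps, List.countP_map]; rfl
  have hbl : pyBisectLeft steps t = (c : Int) := by rw [pyBisectLeft, hcsteps]
  have hsp : steps.Pairwise (· ≤ ·) := by
    rw [hsteps]; exact List.pairwise_map.mpr hs
  have hcl : ∀ i, (hi : i < l.length) → ((l[i]'hi).1 < t ↔ i < c) := by
    intro i hi
    have := sorted_countP_lt steps t hsp i (by omega)
    rw [hcsteps] at this
    simpa [hsteps] using this
  have hBA := scanBA_eq t l hs
  rw [← hcdef] at hBA
  by_cases h1 : t ≤ (l[0]'hn).1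
  · -- target at or before the first step: both pick the first pair
    have hc0 : c = 0 := by
      by_contra hcc
      have := (hcl 0 hn).mpr (by omega)
      omega
    have hci : closestIdxA steps t = 0 := by
      unfold closestIdxA
      rw [h0, if_pos h1]
    rw [hc0] at hBA
    simp only [Nat.lt_irrefl, if_false] at hBA
    rw [List.getElem?_eq_getElem hn] at hBA
    rw [hci, hBA]
    have hv0 : PySem.List.pyGetD values 0 0 = (l[0]'hn).2 := by simpa using hgetv 0 hn
    rw [h0, hv0]
    rfl
  · have h1' : (l[0]'hn).1 < t := by omega
    have hc0 : 0 < c := (hcl 0 hn).mp h1'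
    by_cases h2 : (l[l.length - 1]'(by omega)).1 ≤ t
    · -- target at or after the last step: A picks the last pair
      have hci : closestIdxA steps t = (l.length : Int) - 1 := by
        unfold closestIdxA
        rw [h0, if_neg h1, hlast, if_pos h2, hlen]
      have hcast : ((l.length : Int) - 1) = ((l.length - 1 : Nat) : Int) := by omega
      have hA1 : PySem.List.pyGetD steps (closestIdxA steps t) 0 = (l[l.length - 1]'(by omega)).1 := by
        rw [hci, hcast, hget (l.length - 1) (by omega)]
      have hA2 : PySem.List.pyGetD values (closestIdxA steps t) 0 = (l[l.length - 1]'(by omega)).2 := by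
        rw [hci, hcast, hgetv (l.length - 1) (by omega)]
      rw [hA1, hA2]
      by_cases hcn : c < l.length
      · -- some step ≥ t exists, so t equals the maximal step
        have hct : t ≤ (l[c]'hcn).1 := by
          have hni : ¬ ((l[c]'hcn).1 < t) := fun hlt => by have := (hcl c hcn).mp hlt; omega
          omega
        have heq1 : (l[c]'hcn).1 = t := by
          have := hmono c (l.length - 1) (by omega) (by omega)
          omega
        have heqlast : (l[l.length - 1]'(by omega)).1 = t := by
          have := hmono c (l.length - 1) (by omega) (by omega)
          omega
        have hceq : c = l.length - 1 := by
          by_contra hne2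
          apply hcorner
          refine ⟨?_, ?_, ?_⟩
          · rw [List.max?_eq_some_iff]
            constructor
            · exact List.mem_map.mpr ⟨l[l.length - 1]'(by omega), List.getElem_mem _, heqlast⟩
            · intro b hb
              obtain ⟨p, hp, rfl⟩ := List.mem_map.mp hb
              obtain ⟨i, hi, rfl⟩ := List.mem_iff_getElem.mp hp
              exact le_of_le_of_eq (hmono i (l.length - 1) (by omega) (by omega)) heqlast
          · have hmem1 : t ∈ steps.take (c + 1) := by
              refine List.mem_iff_getElem.mpr ⟨c, by simp [List.length_take, hlen]; omega, ?_⟩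
              rw [List.getElem_take]
              simp only [hsteps, List.getElem_map]
              exact heq1
            have hmem2 : t ∈ steps.drop (c + 1) := by
              refine List.mem_iff_getElem.mpr ⟨l.length - 1 - (c + 1), by simp [List.length_drop, hlen]; omega, ?_⟩
              rw [List.getElem_drop]
              have hidx : c + 1 + (l.length - 1 - (c + 1)) = l.length - 1 := by omega
              simp only [hidx, hsteps, List.getElem_map]
              exact heqlast
            have p1 := List.count_pos_iff.mpr hmem1
            have p2 := List.count_pos_iff.mpr hmem2
            have hsum : List.count t (steps.take (c + 1)) + List.count t (steps.drop (c + 1)) = List.count t steps := by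
              rw [← List.count_append, List.take_append_drop]
            omega
          · exact ⟨(l[0]'hn).1, List.mem_map.mpr ⟨l[0]'hn, List.getElem_mem _, rfl⟩, h1'⟩
        -- B: below/above both exist; above wins the tie at distance 0 and is the same pair
        rw [if_pos hc0, List.getElem?_eq_getElem (by omega), List.getElem?_eq_getElem hcn] at hBA
        rw [hBA]
        have hcond : (l[c]'hcn).1 - t < t - (l[c - 1]'(by omega)).1 := by
          have hp : (l[c - 1]'(by omega)).1 < t := (hcl (c - 1) (by omega)).mpr (by omega)
          omega
        simp only [if_pos hcond]
        have h1c : l.length - 1 = c := hceq.symm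
        simp only [h1c]
      · -- every step is below t: B's above is empty, below is the last pair
        have hce : c = l.length := by omega
        rw [if_pos hc0, List.getElem?_eq_getElem (by omega), List.getElem?_eq_none (by omega)] at hBA
        rw [hBA]
        have h1c : c - 1 = l.length - 1 := by omega
        simp only [h1c]
    · -- strictly between first and last step: identical below/above choice
      have h2' : t < (l[l.length - 1]'(by omega)).1 := by omega
      have hcn : c < l.length := by
        by_contra hcc
        have := (hcl (l.length - 1) (by omega)).mpr (by omega)
        omega
      have hprev : (l[c - 1]'(by omega)).1 < t := (hcl (c - 1) (by omega)).mpr (by omega)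
      have hnext : t ≤ (l[c]'hcn).1 := by
        have hni : ¬ ((l[c]'hcn).1 < t) := fun hlt => by have := (hcl c hcn).mp hlt; omega
        omega
      have hcast : ((c : Int) - 1) = ((c - 1 : Nat) : Int) := by omega
      have hgp : PySem.List.pyGetD steps ((c : Int) - 1) 0 = (l[c - 1]'(by omega)).1 := by
        rw [hcast, hget (c - 1) (by omega)]
      have hgc : PySem.List.pyGetD steps (c : Int) 0 = (l[c]'hcn).1 := hget c hcn
      rw [if_pos hc0, List.getElem?_eq_getElem (by omega), List.getElem?_eq_getElem hcn] at hBA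
      rw [hBA]
      by_cases h3 : (l[c]'hcn).1 - t < t - (l[c - 1]'(by omega)).1
      · have hci : closestIdxA steps t = (c : Int) := by
          unfold closestIdxA
          rw [h0, if_neg h1, hlast, if_neg h2]
          simp only [hbl]
          rw [if_neg (by rw [hlen]; omega), if_neg (by omega), hgp, hgc, if_pos h3]
        rw [hci, hget c hcn, hgetv c hcn]
        simp only [if_pos h3]
      · have hci : closestIdxA steps t = (c : Int) - 1 := by
          unfold closestIdxA
          rw [h0, if_neg h1, hlast, if_neg h2]
          simp only [hbl]
          rw [if_neg (by rw [hlen]; omega), if_neg (by omega), hgp, hgc, if_neg h3]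
        rw [hci, hcast, hget (c - 1) (by omega), hgetv (c - 1) (by omega)]
        simp only [if_neg h3]

lemma rowA_eq_rowB (sv : List (Int × Int)) (target_steps : List Int)
    (h : ∀ t ∈ target_steps,
      sv ≠ [] ∧ ¬((sv.map Prod.fst).max? = some t ∧ 2 ≤ (sv.map Prod.fst).count t ∧
        ∃ s ∈ sv.map Prod.fst, s < t)) :
    rowA sv target_steps = rowB sv target_steps := by
  unfold rowA rowB
  refine List.map_congr_left fun t ht => ?_
  obtain ⟨hne, hcor⟩ := h t ht
  set l := PySem.List.sorted sv (fun x => x.1) false with hl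
  have hlne : l ≠ [] := by
    rw [hl]
    simpa [PySem.List.sorted_eq_nil_iff] using hne
  have hle : l.Pairwise (fun a b => a.1 ≤ b.1) := PySem.List.sorted_pairwise sv (fun x => x.1)
  have hperm : l.Perm sv := PySem.List.sorted_perm sv (fun x => x.1) false
  have hpermm : (l.map Prod.fst).Perm (sv.map Prod.fst) := hperm.map Prod.fst
  have hcor2 : ¬((l.map Prod.fst).max? = some t ∧ 2 ≤ (l.map Prod.fst).count t ∧
      ∃ s ∈ l.map Prod.fst, s < t) := by
    rintro ⟨hm, hcnt, s, hsmem, hst⟩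
    apply hcor
    refine ⟨?_, ?_, ⟨s, hpermm.mem_iff.mp hsmem, hst⟩⟩
    · rw [List.max?_eq_some_iff] at hm ⊢
      exact ⟨hpermm.mem_iff.mp hm.1, fun b hb => hm.2 b (hpermm.mem_iff.mpr hb)⟩
    · rw [← hpermm.count_eq]
      exact hcnt
  exact row_core l hlne hle t hcor2

-- ===== VERDICT (by name: the statement is the Claim_ definition above) =====
theorem get_values_at_target_steps_spec : Claim_equal_get_values_at_target_steps := by
  intro data target_steps _ hpre
  unfold Spec_get_values_at_target_steps
  unfold get_values_at_target_steps get_values_at_target_steps_alt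
  congr 1
  refine PySem.List.foldl_congr_mem _ _ _ _ (fun acc p hp => ?_)
  refine congrArg _ (rowA_eq_rowB p.2 target_steps (fun t ht => ?_))
  obtain ⟨h1, h2⟩ := hpre p hp
  exact ⟨h1 (by rintro rfl; simp at ht), h2 t ht⟩
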